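-- pv_equiv track=rewrite | github.com/johnynek/bosatsu | pyout/Bosatsu/Properties.py | ___t11
-- ===== SOURCE A (Python) =====
-- def ___t11(___bi1):
--     ___bistr0 = ___bi1.__str__()
--     ___t12 = []
--     ___t13 = (1, "~", (1, ___bistr0, (1, " == (-1 - ", (1, ___bistr0, (1, ")", (0,))))))
--     while ___t13[0] != 0:
--         ___t12.append(___t13[1])
--         ___t13 = ___t13[2]
--     return (0, True, "".join(___t12))
-- ===== SOURCE B (Python) =====
-- def ___t11(___bi1):
--     s = ___bi1.__str__()
--     return (0, True, "~" + s + " == (-1 - " + s + ")")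
-- ===== Notes on version B (the rewrite author's own statement) =====
-- stated objective: simpler
-- what changed: B computes str(n) once and builds the result by direct string concatenation, removing A's nested-tuple cons list, while loop and fragment accumulator with join.
import Mathlib
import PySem

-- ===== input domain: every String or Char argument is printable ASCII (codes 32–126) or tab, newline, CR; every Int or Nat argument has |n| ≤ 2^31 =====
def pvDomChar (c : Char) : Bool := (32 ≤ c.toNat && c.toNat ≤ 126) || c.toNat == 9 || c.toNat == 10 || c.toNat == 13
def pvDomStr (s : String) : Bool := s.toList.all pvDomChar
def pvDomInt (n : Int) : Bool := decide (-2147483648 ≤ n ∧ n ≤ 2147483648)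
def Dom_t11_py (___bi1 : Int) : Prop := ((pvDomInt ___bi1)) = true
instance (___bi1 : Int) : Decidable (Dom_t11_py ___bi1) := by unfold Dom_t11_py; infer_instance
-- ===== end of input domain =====

-- B removes A's nested-tuple cons list, while loop and join by computing str(n) once and concatenating directly (objective: simpler).

-- ===== PORT A =====
-- A's nested tuples (1, s, rest) / (0,) form a cons list of strings; modelled by this inductive.
inductive T13A : Type
  | nil : T13A
  | cons : String → T13A → T13A

-- the while loop: append head to the accumulator, step to the tail
def t11LoopA : T13A → List String → List String
  | T13A.nil, acc => acc
  | T13A.cons s rest, acc => t11LoopA rest (acc ++ [s])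

def t11_py (___bi1 : Int) : Int × Bool × String :=
  let bistr0 := PySem.Int.toStr ___bi1
  let t13 := T13A.cons "~" (T13A.cons bistr0 (T13A.cons " == (-1 - "
      (T13A.cons bistr0 (T13A.cons ")" T13A.nil))))
  (0, true, PySem.Str.join "" (t11LoopA t13 []))

-- ===== PORT B =====
def t11_py_alt (___bi1 : Int) : Int × Bool × String :=
  let s := PySem.Int.toStr ___bi1
  (0, true, "~" ++ s ++ " == (-1 - " ++ s ++ ")")

-- ===== PRECONDITION & SPEC =====
def Spec_t11_py (___bi1 : Int) (out : Int × Bool × String) : Prop := out = t11_py_alt ___bi1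
instance (___bi1 : Int) (out : Int × Bool × String) : Decidable (Spec_t11_py ___bi1 out) := by unfold Spec_t11_py; infer_instance

-- ===== CLAIM (what is proved, stated in full; the proofs are below) =====
def Claim_equal_t11_py : Prop := ∀ (___bi1 : Int), Dom_t11_py ___bi1 → Spec_t11_py ___bi1 (t11_py ___bi1)

-- ===== LEMMAS AND PROOFS =====
theorem join_five (s : String) :
    PySem.Str.join "" ["~", s, " == (-1 - ", s, ")"] = "~" ++ s ++ " == (-1 - " ++ s ++ ")" := by
  apply String.toList_inj.mp
  simp [PySem.Str.join, PySem.Chars.join, List.intercalate]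

-- ===== VERDICT (by name: the statement is the Claim_ definition above) =====
theorem t11_py_spec : Claim_equal_t11_py := by
  intro n _
  unfold Spec_t11_py t11_py t11_py_alt
  simp [t11LoopA, join_five]
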